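-- pv_equiv track=rewrite | github.com/MrBrantCode/unitest_baseline | mut_generate/mist_train_taco/taco_16276/solution.py | calculate_different_ways_to_spell
-- ===== SOURCE A (Python) =====
-- def calculate_different_ways_to_spell(N: str) -> int:
--     """
--     Calculate the number of different ways to spell a given number.
--
--     Args:
--     N (str): The input number as a string.
--
--     Returns:
--     int: The number of different ways to spell the input number.
--     """
--     result = 1
--     count = 1
--     for i in range(1, len(N)):
--         if N[i - 1] == N[i]:
--             count += 1
--         else:
--             result *= 2 ** (count - 1)
--             count = 1
--     return result * 2 ** (count - 1)
-- ===== SOURCE B (Python) =====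
-- def calculate_different_ways_to_spell(N: str) -> int:
--     """Number of ways = 2 ** (number of adjacent equal-character pairs)."""
--     return 2 ** sum(a == b for a, b in zip(N, N[1:]))
-- ===== Notes on version B (the rewrite author's own statement) =====
-- stated objective: simpler
-- what changed: Replaces the run-tracking accumulating-product loop (result, count state) with the closed form 2 ** (#adjacent equal pairs), computed as one sum over zip(N, N[1:]) followed by a single exponentiation.
import Mathlib
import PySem

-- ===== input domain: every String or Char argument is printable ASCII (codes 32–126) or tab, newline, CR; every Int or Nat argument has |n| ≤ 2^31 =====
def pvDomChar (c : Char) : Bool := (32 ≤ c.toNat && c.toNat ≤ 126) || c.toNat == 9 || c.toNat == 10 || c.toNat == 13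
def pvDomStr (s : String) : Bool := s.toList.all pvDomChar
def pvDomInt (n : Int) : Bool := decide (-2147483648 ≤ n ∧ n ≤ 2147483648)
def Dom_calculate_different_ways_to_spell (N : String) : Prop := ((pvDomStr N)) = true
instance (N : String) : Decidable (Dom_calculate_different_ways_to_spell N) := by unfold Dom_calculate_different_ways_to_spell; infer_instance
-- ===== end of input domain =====

-- B replaces A's run-tracking accumulating-product loop with the closed form
-- 2 ^ (#adjacent equal character pairs); same O(n) cost, simpler expression.

-- ===== PORT A =====
-- A's loop over range(1, len(N)) with state (result, count); indices i-1 and i are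
-- always in range (1 ≤ i < len), so pyGetD's default is never used — exact here.
def calculate_different_ways_to_spell (N : String) : Int :=
  let cs := N.toList
  let st := (PySem.List.pyRange 1 (cs.length : Int) 1).foldl
    (fun (st : Int × Int) i =>
      if PySem.List.pyGetD cs (i - 1) ' ' == PySem.List.pyGetD cs i ' ' then
        (st.1, st.2 + 1)
      else
        (st.1 * 2 ^ (st.2 - 1).toNat, 1))
    (1, 1)
  st.1 * 2 ^ (st.2 - 1).toNat

-- ===== PORT B =====
-- 2 ** sum(a == b for a, b in zip(N, N[1:]))
def calculate_different_ways_to_spell_alt (N : String) : Int :=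
  2 ^ ((N.toList.zip (N.toList.drop 1)).countP (fun p => p.1 == p.2))

-- ===== PRECONDITION & SPEC =====
def Spec_calculate_different_ways_to_spell (N : String) (out : Int) : Prop := out = calculate_different_ways_to_spell_alt N
instance (N : String) (out : Int) : Decidable (Spec_calculate_different_ways_to_spell N out) := by unfold Spec_calculate_different_ways_to_spell; infer_instance

-- ===== CLAIM (what is proved, stated in full; the proofs are below) =====
def Claim_equal_calculate_different_ways_to_spell : Prop := ∀ (N : String), Dom_calculate_different_ways_to_spell N → Spec_calculate_different_ways_to_spell N (calculate_different_ways_to_spell N)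

-- ===== LEMMAS AND PROOFS =====

-- a list of length ≤ 1 has no adjacent pair
lemma zip_tail_short (l : List Char) (h : l.length ≤ 1) : l.zip (l.drop 1) = [] := by
  match l with
  | [] => rfl
  | [x] => rfl
  | x :: y :: t => simp at h

-- loop invariant: finishing A's fold from index a with state (r, c), c ≥ 1, yields
-- r * 2 ^ ((c-1) + #adjacent equal pairs among positions ≥ a-1)
lemma loop_spec (cs : List Char) (n : Nat) : ∀ (a : Nat) (r c : Int),
    1 ≤ a → 1 ≤ c → cs.length - a = n →
    (let st := (PySem.List.pyRange (a : Int) (cs.length : Int) 1).foldl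
      (fun (st : Int × Int) i =>
        if PySem.List.pyGetD cs (i - 1) ' ' == PySem.List.pyGetD cs i ' ' then
          (st.1, st.2 + 1)
        else
          (st.1 * 2 ^ (st.2 - 1).toNat, 1)) (r, c)
     st.1 * 2 ^ (st.2 - 1).toNat)
    = r * 2 ^ ((c - 1).toNat +
        (((cs.drop (a - 1)).zip ((cs.drop (a - 1)).drop 1)).countP (fun p => p.1 == p.2))) := by
  induction n with
  | zero =>
    intro a r c ha hc hn
    have hle : cs.length ≤ a := by omega
    have hshort : (cs.drop (a - 1)).length ≤ 1 := by
      simp [List.length_drop]; omega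
    rw [PySem.List.pyRange_one_eq_nil (by exact_mod_cast hle), zip_tail_short _ hshort]
    simp
  | succ n ih =>
    intro a r c ha hc hn
    have hlt : a < cs.length := by omega
    have hlt' : ((a : Int)) < (cs.length : Int) := by exact_mod_cast hlt
    rw [PySem.List.pyRange_one_cons hlt']
    have h1 : a - 1 < cs.length := by omega
    -- both indices are in range
    have hga : PySem.List.pyGetD cs ((a : Int) - 1) ' ' = cs[a - 1] := by
      have hcast : ((a : Int) - 1) = ((a - 1 : Nat) : Int) := by push_cast [ha]; ring
      rw [hcast, PySem.List.pyGetD_natCast, List.getD_eq_getElem cs ' ' h1]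
    have hgb : PySem.List.pyGetD cs (a : Int) ' ' = cs[a] := by
      rw [PySem.List.pyGetD_natCast, List.getD_eq_getElem cs ' ' hlt]
    have hdropa : cs.drop a = cs[a] :: cs.drop (a + 1) := List.drop_eq_getElem_cons hlt
    have hdrop : cs.drop (a - 1) = cs[a - 1] :: cs.drop a := by
      have h2 : a - 1 + 1 = a := by omega
      rw [List.drop_eq_getElem_cons h1, h2]
    have hcount : ((cs.drop (a - 1)).zip ((cs.drop (a - 1)).drop 1)).countP
        (fun p => p.1 == p.2)
        = (if cs[a - 1] == cs[a] then 1 else 0)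
          + ((cs.drop a).zip ((cs.drop a).drop 1)).countP (fun p => p.1 == p.2) := by
      rw [hdrop]
      simp only [List.drop_one, List.tail_cons]
      rw [hdropa]
      simp only [List.tail_cons, List.zip_cons_cons, List.countP_cons]
      by_cases heq : (cs[a - 1] == cs[a]) = true <;> simp [heq, Nat.add_comm]
    simp only [List.foldl_cons, hga, hgb]
    by_cases heq : (cs[a - 1] == cs[a]) = true
    · rw [if_pos heq]
      have key := ih (a + 1) r (c + 1) (by omega) (by omega) (by omega)
      simp only at key
      push_cast at key ⊢
      rw [key, hcount]
      simp only [heq, if_true]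
      congr 2
      omega
    · rw [if_neg heq]
      have key := ih (a + 1) (r * 2 ^ (c - 1).toNat) 1 (by omega) (by omega) (by omega)
      simp only at key
      push_cast at key ⊢
      rw [key, hcount]
      simp only [heq, Nat.zero_add]
      norm_num
      rw [pow_add]
      ring

-- ===== VERDICT (by name: the statement is the Claim_ definition above) =====
theorem calculate_different_ways_to_spell_spec : Claim_equal_calculate_different_ways_to_spell := by
  intro N _
  unfold Spec_calculate_different_ways_to_spell calculate_different_ways_to_spell
    calculate_different_ways_to_spell_alt
  have h := loop_spec N.toList (N.toList.length - 1) 1 1 1 (by omega) (by omega) rfl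
  simp only at h ⊢
  push_cast at h ⊢
  rw [h]
  simp
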